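-- pv_equiv track=rewrite | github.com/VvR7/SYSUAILAB | Lab3/code/15-puzzle-IDAstar.py | calc
-- ===== SOURCE A (Python) =====
-- def calc(a):
--     d = []
--     row = 0
--     for i in range(1, 5):
--         for j in range(1, 5):
--             if a[i][j] != 0:
--                 d.append(a[i][j])
--             else:
--                 row = 5 - i
--     ans = 0
--     for i in range(15):
--         for j in range(i):
--             if d[j] > d[i]:
--                 ans += 1
--     return ans + row
-- ===== SOURCE B (Python) =====
-- def calc(a):
--     d = [x for r in a[1:5] for x in r[1:5] if x != 0]
--     row = 0
--     for i in range(1, 5):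
--         if 0 in a[i][1:5]:
--             row = 5 - i
--     ans = 0
--     s = []  # tiles seen so far, kept sorted
--     for x in d[:15]:
--         k = 0
--         while k < len(s) and s[k] <= x:
--             k += 1
--         ans += len(s) - k
--         s.insert(k, x)
--     return ans + row
-- ===== Notes on version B (the rewrite author's own statement) =====
-- stated objective: alternative
-- what changed: B builds the tile list by slicing and filtering the four row slices (instead of A's index-driven append loop with a nested j loop), finds the blank row by a membership test on each row slice, and replaces A's nested all-pairs inversion loop by a single pass over the tiles that maintains a sorted list of tiles seen so far and adds, per tile, the count of already-seen strictly greater tiles.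
import Mathlib
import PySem

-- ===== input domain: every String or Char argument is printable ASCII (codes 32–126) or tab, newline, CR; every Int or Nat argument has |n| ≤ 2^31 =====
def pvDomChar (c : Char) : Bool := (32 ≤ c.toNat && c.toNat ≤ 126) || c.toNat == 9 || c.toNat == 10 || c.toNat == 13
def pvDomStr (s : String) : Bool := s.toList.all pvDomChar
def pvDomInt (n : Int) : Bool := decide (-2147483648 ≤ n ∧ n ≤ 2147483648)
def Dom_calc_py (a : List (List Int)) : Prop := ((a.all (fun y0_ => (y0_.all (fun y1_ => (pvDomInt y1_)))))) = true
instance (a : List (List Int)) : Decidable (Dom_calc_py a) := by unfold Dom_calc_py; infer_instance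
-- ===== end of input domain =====

-- B builds the tile list by slicing/filtering the rows instead of A's index-driven append
-- loop, finds the blank row by a membership test on a row slice, and replaces A's nested
-- all-pairs inversion loop by one pass over the tiles that keeps the tiles seen so far in
-- a sorted list and adds, per tile, the count of already-seen strictly greater tiles
-- (objective: alternative algorithm, same result).

-- ===== PORT A =====
-- d/row scan: for i in 1..4, for j in 1..4: append a[i][j] if nonzero else row = 5-i
def calcScanA (a : List (List Int)) : List Int × Int :=
  (PySem.List.pyRange 1 5 1).foldl (fun st i =>
    (PySem.List.pyRange 1 5 1).foldl (fun st j =>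
      if PySem.List.pyGetD (PySem.List.pyGetD a i []) j 0 ≠ 0 then
        (st.1 ++ [PySem.List.pyGetD (PySem.List.pyGetD a i []) j 0], st.2)
      else (st.1, 5 - i)) st) (([] : List Int), (0 : Int))

-- ans: for i in range(15): for j in range(i): if d[j] > d[i]: ans += 1
def calcInvA (d : List Int) : Int :=
  (PySem.List.pyRange 0 15 1).foldl (fun ans i =>
    (PySem.List.pyRange 0 i 1).foldl (fun ans j =>
      if PySem.List.pyGetD d j 0 > PySem.List.pyGetD d i 0 then ans + 1 else ans) ans) 0

def calc_py (a : List (List Int)) : Int :=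
  let dr := calcScanA a
  calcInvA dr.1 + dr.2

-- ===== PORT B =====
-- d = [x for r in a[1:5] for x in r[1:5] if x != 0]
def calcTilesB (a : List (List Int)) : List Int :=
  (PySem.List.slice a (some 1) (some 5)).flatMap
    (fun r => (PySem.List.slice r (some 1) (some 5)).filter (fun x => x ≠ 0))

-- for i in range(1,5): if 0 in a[i][1:5]: row = 5 - i
def calcRowB (a : List (List Int)) : Int :=
  (PySem.List.pyRange 1 5 1).foldl (fun row i =>
    if (0 : Int) ∈ PySem.List.slice (PySem.List.pyGetD a i []) (some 1) (some 5)
    then 5 - i else row) 0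

-- the while loop 'k = 0; while k < len(s) and s[k] <= x: k += 1' (counts the leading run ≤ x)
def bisectUpper (s : List Int) (x : Int) : Int :=
  match s with
  | [] => 0
  | y :: t => if y ≤ x then bisectUpper t x + 1 else 0

-- for x in l: k = bisectUpper; ans += len(s) - k; s.insert(k, x)
def calcSweep (l : List Int) : Int × List Int :=
  l.foldl (fun st x =>
    let k := bisectUpper st.2 x
    (st.1 + ((st.2.length : Int) - k), PySem.List.insert st.2 k x)) ((0 : Int), ([] : List Int))

def calc_py_alt (a : List (List Int)) : Int :=
  (calcSweep (PySem.List.slice (calcTilesB a) none (some 15))).1 + calcRowB a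

-- ===== PRECONDITION & SPEC =====
-- Pre_ excludes exactly the inputs on which Python A raises IndexError: a board without
-- rows/columns 1..4, or one whose 4x4 block has two or more zeros (then d has < 15 entries).
def Pre_calc_py (a : List (List Int)) : Prop :=
  5 ≤ a.length ∧ (∀ r ∈ (a.drop 1).take 4, 5 ≤ r.length) ∧
  (((a.drop 1).take 4).map (fun r => ((r.drop 1).take 4).count 0)).sum ≤ 1
instance (a : List (List Int)) : Decidable (Pre_calc_py a) := by unfold Pre_calc_py; infer_instance

def pvWitness_calc_py : List (List Int) :=
  [[0,0,0,0,0],[0,1,2,3,4],[0,5,6,7,8],[0,9,10,11,12],[0,13,14,15,0]]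

def Spec_calc_py (a : List (List Int)) (out : Int) : Prop := out = calc_py_alt a
instance (a : List (List Int)) (out : Int) : Decidable (Spec_calc_py a out) := by unfold Spec_calc_py; infer_instance

-- ===== CLAIM (what is proved, stated in full; the proofs are below) =====
def Claim_equal_calc_py : Prop := ∀ (a : List (List Int)), Dom_calc_py a → Pre_calc_py a → Spec_calc_py a (calc_py a)

-- ===== LEMMAS AND PROOFS =====

-- Nat-valued twin of bisectUpper
def buN (s : List Int) (x : Int) : Nat :=
  match s with
  | [] => 0
  | y :: t => if y ≤ x then buN t x + 1 else 0

theorem bisectUpper_eq_buN (s : List Int) (x : Int) : bisectUpper s x = (buN s x : Int) := by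
  induction s with
  | nil => simp [bisectUpper, buN]
  | cons y t ih => by_cases h : y ≤ x <;> simp [bisectUpper, buN, h, ih]

theorem buN_le (s : List Int) (x : Int) : buN s x ≤ s.length := by
  induction s with
  | nil => simp [buN]
  | cons y t ih => by_cases h : y ≤ x <;> simp [buN, h] <;> omega

theorem takeDrop_buN (s : List Int) (x : Int) :
    s.take (buN s x) ++ x :: s.drop (buN s x) = List.orderedInsert (· < ·) x s := by
  induction s with
  | nil => simp [buN]
  | cons y t ih =>
    by_cases h : y ≤ x
    · have hxy : ¬ x < y := not_lt.mpr h
      simp [buN, h, List.orderedInsert, hxy, ih]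
    · have hxy : x < y := lt_of_not_ge h
      simp [buN, h, List.orderedInsert, hxy]

theorem insert_buN (s : List Int) (x : Int) :
    PySem.List.insert s ((buN s x : Nat) : Int) x = List.orderedInsert (· < ·) x s := by
  rw [PySem.List.insert_natCast s (buN s x) x (buN_le s x), takeDrop_buN]

theorem buN_sorted (s : List Int) (x : Int) (h : s.Pairwise (· ≤ ·)) :
    buN s x = s.countP (fun y => decide (y ≤ x)) := by
  induction s with
  | nil => simp [buN]
  | cons y t ih =>
    rw [List.pairwise_cons] at h
    by_cases hyx : y ≤ x
    · simp [buN, hyx, List.countP_cons, ih h.2]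
    · have : t.countP (fun y => decide (y ≤ x)) = 0 := by
        rw [List.countP_eq_zero]
        intro z hz
        simp only [decide_eq_true_eq]
        exact fun hzx => hyx (le_trans (h.1 z hz) hzx)
      simp [buN, hyx, List.countP_cons, this]

theorem pairwise_orderedInsert (s : List Int) (x : Int) (h : s.Pairwise (· ≤ ·)) :
    (List.orderedInsert (· < ·) x s).Pairwise (· ≤ ·) := by
  induction s with
  | nil => simp [List.orderedInsert]
  | cons y t ih =>
    rw [List.pairwise_cons] at h
    by_cases hxy : x < y
    · rw [List.orderedInsert, if_pos hxy]
      refine List.pairwise_cons.mpr ⟨?_, List.pairwise_cons.mpr h⟩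
      intro z hz
      rcases List.mem_cons.mp hz with rfl | hz
      · exact le_of_lt hxy
      · exact le_trans (le_of_lt hxy) (h.1 z hz)
    · rw [List.orderedInsert, if_neg hxy]
      refine List.pairwise_cons.mpr ⟨?_, ih h.2⟩
      intro z hz
      rcases (List.mem_orderedInsert _).mp hz with rfl | hz
      · exact not_lt.mp hxy
      · exact h.1 z hz

-- inner counting loop of A
theorem foldl_count_ite (l : List Int) (c : Int → Prop) [DecidablePred c] (a : Int) :
    l.foldl (fun ans j => if c j then ans + 1 else ans) a
      = a + (l.countP (fun j => decide (c j)) : Int) := by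
  induction l generalizing a with
  | nil => simp
  | cons y t ih =>
    by_cases h : c y <;> simp [List.countP_cons, h, ih] <;> push_cast <;> ring

def eD (d : List Int) (k : Nat) : Int := PySem.List.pyGetD d (k : Int) 0

def invAux (d : List Int) (n : Nat) : Int :=
  (PySem.List.pyRange 0 (n : Int) 1).foldl (fun ans i =>
    (PySem.List.pyRange 0 i 1).foldl (fun ans j =>
      if PySem.List.pyGetD d j 0 > PySem.List.pyGetD d i 0 then ans + 1 else ans) ans) 0

def sweepAux (d : List Int) (n : Nat) : Int × List Int :=
  calcSweep ((List.range n).map (eD d))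

theorem invAux_succ (d : List Int) (n : Nat) :
    invAux d (n + 1)
      = invAux d n + ((List.range n).countP (fun k => decide (eD d n < eD d k)) : Int) := by
  unfold invAux
  push_cast
  rw [PySem.List.pyRange_one_succ_right (by positivity), List.foldl_append]
  rw [List.foldl_cons, List.foldl_nil]
  rw [foldl_count_ite]
  rw [PySem.List.pyRange_zero_natCast, List.countP_map]
  rfl

theorem sweepAux_succ (d : List Int) (n : Nat) :
    sweepAux d (n + 1)
      = ((sweepAux d n).1 + (((sweepAux d n).2.length : Int) - bisectUpper (sweepAux d n).2 (eD d n)),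
         PySem.List.insert (sweepAux d n).2 (bisectUpper (sweepAux d n).2 (eD d n)) (eD d n)) := by
  unfold sweepAux calcSweep
  rw [List.range_succ, List.map_append, List.foldl_append]
  rfl

theorem main_invariant (d : List Int) (n : Nat) :
    (sweepAux d n).1 = invAux d n
      ∧ (sweepAux d n).2.Perm ((List.range n).map (eD d))
      ∧ (sweepAux d n).2.Pairwise (· ≤ ·) := by
  induction n with
  | zero =>
    refine ⟨rfl, ?_, ?_⟩ <;> simp [sweepAux, calcSweep]
  | succ n ih =>
    obtain ⟨hans, hperm, hsort⟩ := ih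
    have hk : bisectUpper (sweepAux d n).2 (eD d n)
        = ((sweepAux d n).2.countP (fun y => decide (y ≤ eD d n)) : Int) := by
      rw [bisectUpper_eq_buN, buN_sorted _ _ hsort]
    have hlen : (sweepAux d n).2.length
        = (sweepAux d n).2.countP (fun y => decide (y ≤ eD d n))
          + (sweepAux d n).2.countP (fun y => decide (eD d n < y)) := by
      rw [List.length_eq_countP_add_countP (fun y => decide (y ≤ eD d n))]
      congr 1
      refine List.countP_congr ?_
      intro z _
      by_cases h : z ≤ eD d n
      · have h2 : ¬ eD d n < z := not_lt.mpr h
        simp [h, h2]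
      · have h2 : eD d n < z := lt_of_not_ge h
        simp [h, h2]
    have hcount : (sweepAux d n).2.countP (fun y => decide (eD d n < y))
        = (List.range n).countP (fun k => decide (eD d n < eD d k)) := by
      rw [hperm.countP_eq, List.countP_map]
      rfl
    refine ⟨?_, ?_, ?_⟩
    · rw [sweepAux_succ, invAux_succ]
      simp only [hans, hk, hlen, ← hcount]
      push_cast
      ring
    · rw [sweepAux_succ]
      simp only
      rw [bisectUpper_eq_buN, insert_buN]
      refine ((List.perm_orderedInsert _ _ _).trans ?_)
      rw [List.range_succ, List.map_append]
      exact ((hperm.cons (eD d n)).trans (List.perm_append_singleton _ _).symm)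
    · rw [sweepAux_succ]
      simp only
      rw [bisectUpper_eq_buN, insert_buN]
      exact pairwise_orderedInsert _ _ hsort

theorem take_eq_map_range (d : List Int) (n : Nat) (h : n ≤ d.length) :
    d.take n = (List.range n).map (eD d) := by
  apply List.ext_getElem
  · simp [h]
  · intro i h1 h2
    have hi : i < n := by simpa [h] using h1
    have hid : i < d.length := lt_of_lt_of_le hi h
    simp [eD, List.getElem_take, PySem.List.pyGetD_natCast, List.getD_eq_getElem?_getD,
      List.getElem?_eq_getElem hid]

theorem key (d : List Int) (h : 15 ≤ d.length) :
    calcInvA d = (calcSweep (PySem.List.slice d none (some 15))).1 := by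
  have hsl : PySem.List.slice d none (some (15 : Int)) = d.take 15 := by
    simp [pysem]
  have hA : calcInvA d = invAux d 15 := by
    unfold calcInvA invAux; norm_num
  rw [hsl, take_eq_map_range d 15 h, hA]
  exact ((main_invariant d 15).1).symm

-- (l.filter (· ≠ 0)).length + l.count 0 = l.length
theorem length_filter_add_count (l : List Int) :
    (l.filter (fun x => x ≠ 0)).length + l.count 0 = l.length := by
  induction l with
  | nil => simp
  | cons y t ih =>
    by_cases h : y = 0 <;> simp [h, List.count_cons] at ih ⊢ <;> omega

-- A's inner row loop on an explicit row, against B's filter/membership forms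
theorem innerA_row (c0 e1 e2 e3 e4 : Int) (rest : List Int) (st : List Int × Int) (i : Int) :
    ([1, 2, 3, 4] : List Int).foldl (fun st j =>
      if PySem.List.pyGetD (c0 :: e1 :: e2 :: e3 :: e4 :: rest) j 0 ≠ 0 then
        (st.1 ++ [PySem.List.pyGetD (c0 :: e1 :: e2 :: e3 :: e4 :: rest) j 0], st.2)
      else (st.1, 5 - i)) st
    = (st.1 ++ ([e1, e2, e3, e4].filter (fun x => x ≠ 0)),
       if (0 : Int) ∈ ([e1, e2, e3, e4] : List Int) then 5 - i else st.2) := by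
  have g1 : PySem.List.pyGetD (c0 :: e1 :: e2 :: e3 :: e4 :: rest) (1 : Int) 0 = e1 := by
    simp [PySem.List.pyGetD_ofNat']
  have g2 : PySem.List.pyGetD (c0 :: e1 :: e2 :: e3 :: e4 :: rest) (2 : Int) 0 = e2 := by
    simp [PySem.List.pyGetD_ofNat']
  have g3 : PySem.List.pyGetD (c0 :: e1 :: e2 :: e3 :: e4 :: rest) (3 : Int) 0 = e3 := by
    simp [PySem.List.pyGetD_ofNat']
  have g4 : PySem.List.pyGetD (c0 :: e1 :: e2 :: e3 :: e4 :: rest) (4 : Int) 0 = e4 := by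
    simp [PySem.List.pyGetD_ofNat']
  simp only [List.foldl_cons, List.foldl_nil, g1, g2, g3, g4]
  by_cases h1 : e1 = 0 <;> by_cases h2 : e2 = 0 <;> by_cases h3 : e3 = 0 <;> by_cases h4 : e4 = 0 <;>
    simp [h1, h2, h3, h4] <;> omega

theorem slice15 {α : Type} (c0 e1 e2 e3 e4 : α) (rest : List α) :
    PySem.List.slice (c0 :: e1 :: e2 :: e3 :: e4 :: rest) (some 1) (some 5) = [e1, e2, e3, e4] := by
  rw [PySem.List.slice_toNat] <;> simp

-- a list of length ≥ 5 starts with five explicit elements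
theorem exists5 {α : Type} (l : List α) (h : 5 ≤ l.length) :
    ∃ x0 x1 x2 x3 x4 t, l = x0 :: x1 :: x2 :: x3 :: x4 :: t := by
  rcases l with _ | ⟨x0, l⟩; · simp at h
  rcases l with _ | ⟨x1, l⟩; · simp at h
  rcases l with _ | ⟨x2, l⟩; · simp at h
  rcases l with _ | ⟨x3, l⟩; · simp at h
  rcases l with _ | ⟨x4, l⟩; · simp at h
  exact ⟨x0, x1, x2, x3, x4, l, rfl⟩

-- ===== VERDICT (by name: the statement is the Claim_ definition above) =====
theorem calc_py_spec : Claim_equal_calc_py := by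
  intro a _ hpre
  obtain ⟨hlen, hrows, hz⟩ := hpre
  obtain ⟨r0, R1, R2, R3, R4, arest, rfl⟩ := exists5 a hlen
  have h1 : 5 ≤ R1.length := hrows R1 (by simp)
  have h2 : 5 ≤ R2.length := hrows R2 (by simp)
  have h3 : 5 ≤ R3.length := hrows R3 (by simp)
  have h4 : 5 ≤ R4.length := hrows R4 (by simp)
  obtain ⟨c1, e11, e12, e13, e14, t1, rfl⟩ := exists5 R1 h1
  obtain ⟨c2, e21, e22, e23, e24, t2, rfl⟩ := exists5 R2 h2
  obtain ⟨c3, e31, e32, e33, e34, t3, rfl⟩ := exists5 R3 h3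
  obtain ⟨c4, e41, e42, e43, e44, t4, rfl⟩ := exists5 R4 h4
  have hr : PySem.List.pyRange 1 5 1 = [1, 2, 3, 4] := by decide
  have ga1 : PySem.List.pyGetD (r0 :: (c1 :: e11 :: e12 :: e13 :: e14 :: t1) ::
      (c2 :: e21 :: e22 :: e23 :: e24 :: t2) :: (c3 :: e31 :: e32 :: e33 :: e34 :: t3) ::
      (c4 :: e41 :: e42 :: e43 :: e44 :: t4) :: arest) (1 : Int) []
      = c1 :: e11 :: e12 :: e13 :: e14 :: t1 := by simp [PySem.List.pyGetD_ofNat']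
  have ga2 : PySem.List.pyGetD (r0 :: (c1 :: e11 :: e12 :: e13 :: e14 :: t1) ::
      (c2 :: e21 :: e22 :: e23 :: e24 :: t2) :: (c3 :: e31 :: e32 :: e33 :: e34 :: t3) ::
      (c4 :: e41 :: e42 :: e43 :: e44 :: t4) :: arest) (2 : Int) []
      = c2 :: e21 :: e22 :: e23 :: e24 :: t2 := by simp [PySem.List.pyGetD_ofNat']
  have ga3 : PySem.List.pyGetD (r0 :: (c1 :: e11 :: e12 :: e13 :: e14 :: t1) ::
      (c2 :: e21 :: e22 :: e23 :: e24 :: t2) :: (c3 :: e31 :: e32 :: e33 :: e34 :: t3) ::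
      (c4 :: e41 :: e42 :: e43 :: e44 :: t4) :: arest) (3 : Int) []
      = c3 :: e31 :: e32 :: e33 :: e34 :: t3 := by simp [PySem.List.pyGetD_ofNat']
  have ga4 : PySem.List.pyGetD (r0 :: (c1 :: e11 :: e12 :: e13 :: e14 :: t1) ::
      (c2 :: e21 :: e22 :: e23 :: e24 :: t2) :: (c3 :: e31 :: e32 :: e33 :: e34 :: t3) ::
      (c4 :: e41 :: e42 :: e43 :: e44 :: t4) :: arest) (4 : Int) []
      = c4 :: e41 :: e42 :: e43 :: e44 :: t4 := by simp [PySem.List.pyGetD_ofNat']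
  have hA : calcScanA (r0 :: (c1 :: e11 :: e12 :: e13 :: e14 :: t1) ::
      (c2 :: e21 :: e22 :: e23 :: e24 :: t2) :: (c3 :: e31 :: e32 :: e33 :: e34 :: t3) ::
      (c4 :: e41 :: e42 :: e43 :: e44 :: t4) :: arest)
      = (((([] ++ [e11, e12, e13, e14].filter (fun x => x ≠ 0))
            ++ [e21, e22, e23, e24].filter (fun x => x ≠ 0))
            ++ [e31, e32, e33, e34].filter (fun x => x ≠ 0))
            ++ [e41, e42, e43, e44].filter (fun x => x ≠ 0),
         if (0 : Int) ∈ ([e41, e42, e43, e44] : List Int) then 5 - 4 else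
         if (0 : Int) ∈ ([e31, e32, e33, e34] : List Int) then 5 - 3 else
         if (0 : Int) ∈ ([e21, e22, e23, e24] : List Int) then 5 - 2 else
         if (0 : Int) ∈ ([e11, e12, e13, e14] : List Int) then 5 - 1 else 0) := by
    unfold calcScanA
    rw [hr]
    rw [show ∀ (F : (List Int × Int) → Int → (List Int × Int)) init,
        ([1, 2, 3, 4] : List Int).foldl F init = F (F (F (F init 1) 2) 3) 4 from fun F init => rfl]
    simp only [ga1, ga2, ga3, ga4]
    rw [innerA_row, innerA_row, innerA_row, innerA_row]
  have hd : calcTilesB (r0 :: (c1 :: e11 :: e12 :: e13 :: e14 :: t1) ::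
      (c2 :: e21 :: e22 :: e23 :: e24 :: t2) :: (c3 :: e31 :: e32 :: e33 :: e34 :: t3) ::
      (c4 :: e41 :: e42 :: e43 :: e44 :: t4) :: arest)
      = ((([] ++ [e11, e12, e13, e14].filter (fun x => x ≠ 0))
            ++ [e21, e22, e23, e24].filter (fun x => x ≠ 0))
            ++ [e31, e32, e33, e34].filter (fun x => x ≠ 0))
            ++ [e41, e42, e43, e44].filter (fun x => x ≠ 0) := by
    unfold calcTilesB
    rw [slice15]
    simp only [slice15, List.flatMap_cons, List.flatMap_nil, List.append_nil, List.nil_append,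
      List.append_assoc]
  have hrow : calcRowB (r0 :: (c1 :: e11 :: e12 :: e13 :: e14 :: t1) ::
      (c2 :: e21 :: e22 :: e23 :: e24 :: t2) :: (c3 :: e31 :: e32 :: e33 :: e34 :: t3) ::
      (c4 :: e41 :: e42 :: e43 :: e44 :: t4) :: arest)
      = (if (0 : Int) ∈ ([e41, e42, e43, e44] : List Int) then 5 - 4 else
         if (0 : Int) ∈ ([e31, e32, e33, e34] : List Int) then 5 - 3 else
         if (0 : Int) ∈ ([e21, e22, e23, e24] : List Int) then 5 - 2 else
         if (0 : Int) ∈ ([e11, e12, e13, e14] : List Int) then 5 - 1 else 0) := by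
    unfold calcRowB
    rw [hr]
    simp only [List.foldl_cons, List.foldl_nil, ga1, ga2, ga3, ga4, slice15]
  have hf1 := length_filter_add_count [e11, e12, e13, e14]
  have hf2 := length_filter_add_count [e21, e22, e23, e24]
  have hf3 := length_filter_add_count [e31, e32, e33, e34]
  have hf4 := length_filter_add_count [e41, e42, e43, e44]
  have hlen15 : 15 ≤ (((([] ++ [e11, e12, e13, e14].filter (fun x => x ≠ 0))
            ++ [e21, e22, e23, e24].filter (fun x => x ≠ 0))
            ++ [e31, e32, e33, e34].filter (fun x => x ≠ 0))
            ++ [e41, e42, e43, e44].filter (fun x => x ≠ 0)).length := by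
    simp at hz hf1 hf2 hf3 hf4 ⊢
    omega
  unfold Spec_calc_py calc_py calc_py_alt
  rw [hA, hd, hrow]
  simp only
  rw [key _ hlen15]
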